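-- pv_equiv track=rewrite | github.com/iamjonguz/openpose_3d | openpose_3d.py | filter_keypoints
-- ===== SOURCE A (Python) =====
-- def filter_keypoints(keypoints_2d):
--     '''
--     Filter keypoints from foot and head just leaving one keypoint for each of them.
--     '''
--     filtered_kp = []
--     for i, kp in enumerate(keypoints_2d):
--         if i == 19 or i == 20 or i == 21 or i == 22 or i == 23 or i == 24 or i == 15 or i == 16 or i == 17 or i == 18 :
--             pass
--         else:
--             filtered_kp.append(kp)
--
--     return filtered_kp
-- ===== SOURCE B (Python) =====
-- def filter_keypoints(keypoints_2d):
--     return keypoints_2d[:15] + keypoints_2d[25:]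
-- ===== Notes on version B (the rewrite author's own statement) =====
-- stated objective: simpler
-- what changed: The excluded indices 15-24 form one contiguous block, so the per-element enumerate loop with a ten-way index test is replaced by closed-form slicing: keypoints_2d[:15] + keypoints_2d[25:].
import Mathlib
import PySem

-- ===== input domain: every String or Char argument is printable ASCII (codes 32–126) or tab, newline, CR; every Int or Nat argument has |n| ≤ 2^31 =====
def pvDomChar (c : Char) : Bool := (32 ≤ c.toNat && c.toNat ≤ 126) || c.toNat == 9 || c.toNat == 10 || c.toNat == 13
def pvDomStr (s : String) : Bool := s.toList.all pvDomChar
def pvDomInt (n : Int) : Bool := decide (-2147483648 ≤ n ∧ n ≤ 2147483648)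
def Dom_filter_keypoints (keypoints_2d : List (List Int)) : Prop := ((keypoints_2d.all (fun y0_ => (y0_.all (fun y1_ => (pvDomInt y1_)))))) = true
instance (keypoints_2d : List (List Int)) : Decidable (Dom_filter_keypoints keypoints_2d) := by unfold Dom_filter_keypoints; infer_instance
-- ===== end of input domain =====

-- B replaces A's enumerate loop with a ten-way index test by closed-form slicing of the
-- contiguous excluded block 15..24 (objective: simpler).

-- ===== PORT A =====
def filter_keypoints (keypoints_2d : List (List Int)) : List (List Int) :=
  (PySem.List.enumerate keypoints_2d 0).foldl
    (fun filtered_kp p =>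
      if p.1 == 19 || p.1 == 20 || p.1 == 21 || p.1 == 22 || p.1 == 23 || p.1 == 24 ||
         p.1 == 15 || p.1 == 16 || p.1 == 17 || p.1 == 18 then
        filtered_kp
      else
        filtered_kp ++ [p.2]) []

-- ===== PORT B =====
-- keypoints_2d[:15] + keypoints_2d[25:]
def filter_keypoints_alt (keypoints_2d : List (List Int)) : List (List Int) :=
  PySem.List.slice keypoints_2d none (some 15) ++ PySem.List.slice keypoints_2d (some 25) none

-- ===== PRECONDITION & SPEC =====
def Spec_filter_keypoints (keypoints_2d : List (List Int)) (out : List (List Int)) : Prop := out = filter_keypoints_alt keypoints_2d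
instance (keypoints_2d : List (List Int)) (out : List (List Int)) : Decidable (Spec_filter_keypoints keypoints_2d out) := by unfold Spec_filter_keypoints; infer_instance

-- ===== CLAIM (what is proved, stated in full; the proofs are below) =====
def Claim_equal_filter_keypoints : Prop := ∀ (keypoints_2d : List (List Int)), Dom_filter_keypoints keypoints_2d → Spec_filter_keypoints keypoints_2d (filter_keypoints keypoints_2d)

-- ===== LEMMAS AND PROOFS =====

def pvExcl (i : Int) : Bool :=
  i == 19 || i == 20 || i == 21 || i == 22 || i == 23 || i == 24 ||
  i == 15 || i == 16 || i == 17 || i == 18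

theorem pvExcl_iff (i : Int) : pvExcl i = true ↔ (15 ≤ i ∧ i ≤ 24) := by
  unfold pvExcl
  simp only [Bool.or_eq_true, beq_iff_eq]
  omega

theorem pv_filter_enumerate (ks : List (List Int)) :
    ∀ s : Nat,
      ((PySem.List.enumerate ks (s : Int)).filter (fun p => !pvExcl p.1)).map Prod.snd
        = ks.take (15 - s) ++ ks.drop (25 - s) := by
  induction ks with
  | nil => intro s; simp [PySem.List.enumerate_nil]
  | cons x ks ih =>
    intro s
    rw [PySem.List.enumerate_cons]
    have h1 : ((s : Int) + 1) = ((s + 1 : Nat) : Int) := by push_cast; ring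
    by_cases hx : pvExcl (s : Int) = true
    · have hs : 15 ≤ s ∧ s ≤ 24 := by
        have := (pvExcl_iff (s : Int)).mp hx; constructor <;> omega
      have h15 : 15 - s = 0 := by omega
      have h15' : 15 - (s + 1) = 0 := by omega
      simp only [List.filter_cons, hx, Bool.not_true, if_false, Bool.false_eq_true]
      rw [h1, ih (s + 1), h15, h15']
      simp only [List.take_zero, List.nil_append]
      by_cases h25 : s + 1 ≤ 25
      · have : 25 - s = (25 - (s + 1)) + 1 := by omega
        rw [this, List.drop_succ_cons]
      · omega
    · have hs : s < 15 ∨ 25 ≤ s := by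
        have := (pvExcl_iff (s : Int)); rcases Bool.eq_false_iff.mpr hx with _
        have h2 : ¬ (15 ≤ (s : Int) ∧ (s : Int) ≤ 24) := fun h => hx ((pvExcl_iff _).mpr h)
        omega
      simp only [List.filter_cons, hx, Bool.not_false, if_true]
      rw [List.map_cons, h1, ih (s + 1)]
      rcases hs with h | h
      · have ht : 15 - s = (15 - (s + 1)) + 1 := by omega
        have hd : 25 - s = (25 - (s + 1)) + 1 := by omega
        rw [ht, hd, List.take_succ_cons, List.drop_succ_cons, List.cons_append]
      · have ht : 15 - s = 0 := by omega
        have ht' : 15 - (s + 1) = 0 := by omega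
        have hd : 25 - s = 0 := by omega
        have hd' : 25 - (s + 1) = 0 := by omega
        rw [ht, ht', hd, hd']
        simp

-- ===== VERDICT (by name: the statement is the Claim_ definition above) =====
theorem filter_keypoints_spec : Claim_equal_filter_keypoints := by
  intro ks _
  show filter_keypoints ks = filter_keypoints_alt ks
  unfold filter_keypoints filter_keypoints_alt
  have hfun : (fun (acc : List (List Int)) (p : Int × List Int) =>
      if p.1 == 19 || p.1 == 20 || p.1 == 21 || p.1 == 22 || p.1 == 23 || p.1 == 24 ||
         p.1 == 15 || p.1 == 16 || p.1 == 17 || p.1 == 18 then acc else acc ++ [p.2])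
      = (fun acc p => if (!pvExcl p.1) = true then acc ++ [Prod.snd p] else acc) := by
    funext acc p
    unfold pvExcl
    cases h : (p.1 == 19 || p.1 == 20 || p.1 == 21 || p.1 == 22 || p.1 == 23 || p.1 == 24 ||
         p.1 == 15 || p.1 == 16 || p.1 == 17 || p.1 == 18) <;> simp
  rw [hfun, PySem.List.foldl_append_if]
  have h0 : (0 : Int) = ((0 : Nat) : Int) := rfl
  rw [h0, pv_filter_enumerate ks 0]
  rw [PySem.List.slice_to, PySem.List.slice_from] <;> simp
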